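-- pv_equiv track=rewrite | github.com/smurfedGitHubIO/StackLeague | StackLeague/Invites.py | invites
-- ===== SOURCE A (Python) =====
-- def invites(s):
--     lst = s.split(';')
--     sepcheck = True
--     anotherlst, dct = [], {}
--     for i in range(len(lst)):
--         q = lst[i].split(':')
--         if len(q) != 2:
--             raise Exception('Separator is missing')
--         aq = '('+q[1].upper() + ', ' + q[0].upper()+')'
--         if aq not in dct:
--             dct[aq] = True
--             anotherlst.append('('+q[1].upper() + ', ' + q[0].upper()+')')
--     return ''.join([str(x) for x in sorted(anotherlst)])
-- ===== SOURCE B (Python) =====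
-- def invites(s):
--     # sort-then-adjacent-dedup instead of A's dict-based dedup
--     fs = []
--     for part in s.split(';'):
--         q = part.split(':')
--         if len(q) != 2:
--             raise Exception('Separator is missing')
--         fs.append('(' + q[1].upper() + ', ' + q[0].upper() + ')')
--     fs.sort()
--     out = []
--     for x in fs:
--         if not out or x != out[-1]:
--             out.append(x)
--     return ''.join(out)
-- ===== Notes on version B (the rewrite author's own statement) =====
-- stated objective: alternative
-- what changed: Replaces A's dict-membership dedup during collection with collect-all, sort (duplicates included), then a single adjacent-comparison pass to deduplicate.
import Mathlib
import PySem

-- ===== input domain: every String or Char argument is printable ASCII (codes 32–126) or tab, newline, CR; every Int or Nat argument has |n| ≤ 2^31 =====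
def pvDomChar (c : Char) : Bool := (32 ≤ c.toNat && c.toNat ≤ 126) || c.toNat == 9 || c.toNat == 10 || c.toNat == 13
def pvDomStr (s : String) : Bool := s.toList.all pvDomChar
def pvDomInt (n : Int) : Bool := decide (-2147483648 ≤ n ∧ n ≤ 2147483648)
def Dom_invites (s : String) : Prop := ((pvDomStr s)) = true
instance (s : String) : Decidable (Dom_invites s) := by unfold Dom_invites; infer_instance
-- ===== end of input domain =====

-- B changes the dedup strategy: collect every formatted pair, sort with duplicates, then one
-- adjacent-comparison pass; same result as A's dict-based first-occurrence dedup + sort.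

-- ===== PORT A =====
-- s.split(sep) for a nonempty literal sep (split? is none only for sep = "")
def pySplit (s sep : String) : List String := (PySem.Str.split? s sep).getD []

-- A's indexed for-loop over the parts, with the dict used as a membership set; 'none' = the
-- raise Exception('Separator is missing') path (excluded by Pre_invites).
def invitesA_loop : List String → List String → PySem.Dict String Bool → Option (List String)
  | [], anotherlst, _ => some anotherlst
  | p :: rest, anotherlst, dct =>
      let q := pySplit p ":"
      if q.length ≠ 2 then none
      else
        let aq := "(" ++ PySem.Str.upper (PySem.List.pyGetD q 1 "") ++ ", "
                      ++ PySem.Str.upper (PySem.List.pyGetD q 0 "") ++ ")"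
        if dct.contains aq then invitesA_loop rest anotherlst dct
        else invitesA_loop rest (anotherlst ++ [aq]) (dct.insert aq true)

def invites (s : String) : String :=
  match invitesA_loop (pySplit s ";") [] PySem.Dict.empty with
  | none => ""   -- raise path, outside Pre_invites
  | some anotherlst => PySem.Str.join "" (PySem.List.sorted anotherlst (fun x => x) false)

-- ===== PORT B =====
-- B's first loop: format every part (none = the raise path, excluded by Pre_invites).
def invitesB_fmt (p : String) : Option String :=
  let q := pySplit p ":"
  if q.length ≠ 2 then none
  else some ("(" ++ PySem.Str.upper (PySem.List.pyGetD q 1 "") ++ ", "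
                 ++ PySem.Str.upper (PySem.List.pyGetD q 0 "") ++ ")")

def invitesB_collect : List String → Option (List String)
  | [] => some []
  | p :: rest =>
      match invitesB_fmt p with
      | none => none
      | some a => (invitesB_collect rest).map (fun fs => a :: fs)

-- B's second loop: append x only when it differs from the previously kept element.
def invitesB_adj (prev : String) : List String → List String
  | [] => []
  | y :: t => if y = prev then invitesB_adj prev t else y :: invitesB_adj y t

def invites_alt (s : String) : String :=
  match invitesB_collect (pySplit s ";") with
  | none => ""   -- raise path, outside Pre_invites
  | some fs =>
      match PySem.List.sorted fs (fun x => x) false with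
      | [] => ""
      | y :: t => PySem.Str.join "" (y :: invitesB_adj y t)

-- ===== PRECONDITION & SPEC =====
-- A raises Exception('Separator is missing') whenever some ';'-part does not split on ':' into
-- exactly two pieces; exactly those inputs are excluded.
def Pre_invites (s : String) : Prop :=
  ∀ p ∈ pySplit s ";", (pySplit p ":").length = 2
instance (s : String) : Decidable (Pre_invites s) := by unfold Pre_invites; infer_instance

def pvWitness_invites : String := "alice:bob;carol:dave;alice:bob"

def Spec_invites (s : String) (out : String) : Prop := out = invites_alt s
instance (s : String) (out : String) : Decidable (Spec_invites s out) := by unfold Spec_invites; infer_instance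

-- ===== CLAIM (what is proved, stated in full; the proofs are below) =====
def Claim_equal_invites : Prop := ∀ (s : String), Dom_invites s → Pre_invites s → Spec_invites s (invites s)

-- ===== LEMMAS AND PROOFS =====

-- A's loop, run with a dict whose contains agrees with membership in the accumulator,
-- computes the set-update of the accumulator by B's formatted list.
theorem invitesA_loop_eq (parts : List String) :
    ∀ (acc : List String) (d : PySem.Dict String Bool),
    (∀ x, d.contains x = decide (x ∈ acc)) →
    invitesA_loop parts acc d = (invitesB_collect parts).map (fun fs => PySem.Set.update acc fs) := by
  induction parts with
  | nil => intro acc d _; rfl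
  | cons p rest ih =>
      intro acc d h
      simp only [invitesA_loop, invitesB_collect, invitesB_fmt]
      by_cases hl : (pySplit p ":").length = 2
      · have hne : ¬((pySplit p ":").length ≠ 2) := by simp [hl]
        rw [if_neg hne, if_neg hne]
        set q := pySplit p ":" with hq
        set aq := "(" ++ PySem.Str.upper (PySem.List.pyGetD q 1 "") ++ ", "
                      ++ PySem.Str.upper (PySem.List.pyGetD q 0 "") ++ ")" with haq
        have hadd : ∀ fs : List String,
            PySem.Set.update acc (aq :: fs) = PySem.Set.update (PySem.Set.add acc aq) fs :=
          fun _ => rfl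
        by_cases hm : aq ∈ acc
        · rw [if_pos (by rw [h aq]; simpa using hm), ih acc d h]
          cases invitesB_collect rest with
          | none => rfl
          | some fs =>
              simp only [Option.map_some]
              rw [hadd]
              have : PySem.Set.add acc aq = acc := by
                simp only [PySem.Set.add]
                rw [if_pos ((PySem.Set.contains_iff acc aq).mpr hm)]
              rw [this]
        · rw [if_neg (by rw [h aq]; simpa using hm),
              ih (acc ++ [aq]) (d.insert aq true) ?_]
          · cases invitesB_collect rest with
            | none => rfl
            | some fs =>
                simp only [Option.map_some]
                rw [hadd]
                have : PySem.Set.add acc aq = acc ++ [aq] := by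
                  simp only [PySem.Set.add]
                  rw [if_neg (by rw [PySem.Set.contains_iff]; exact hm)]
                rw [this]
          · intro x
            rw [PySem.Dict.contains_insert, h x]
            simp only [List.mem_append, List.mem_singleton]
            by_cases hx : x = aq <;> simp [hx]
      · rw [if_pos hl, if_pos hl]; rfl

-- B's adjacent-dedup pass on a (≤)-sorted tail whose elements all dominate prev:
-- it is strictly increasing, keeps exactly the elements ≠ prev, and stays above prev.
theorem invitesB_adj_spec :
    ∀ (ys : List String) (prev : String), ys.Pairwise (· ≤ ·) → (∀ y ∈ ys, prev ≤ y) →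
    (invitesB_adj prev ys).Pairwise (· < ·) ∧
    (∀ x, x ∈ invitesB_adj prev ys ↔ x ∈ ys ∧ x ≠ prev) ∧
    (∀ x ∈ invitesB_adj prev ys, prev < x) := by
  intro ys
  induction ys with
  | nil => intro prev _ _; simp [invitesB_adj]
  | cons y t ih =>
      intro prev hp hge
      obtain ⟨hyt, hpt⟩ := List.pairwise_cons.mp hp
      have hpy : prev ≤ y := hge y (by simp)
      by_cases hy : y = prev
      · have e : invitesB_adj prev (y :: t) = invitesB_adj prev t := by
          simp [invitesB_adj, hy]
        have hge' : ∀ z ∈ t, prev ≤ z := fun z hz => hy ▸ hyt z hz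
        obtain ⟨h1, h2, h3⟩ := ih prev hpt hge'
        rw [e]
        refine ⟨h1, ?_, h3⟩
        intro x
        rw [h2]
        subst hy
        simp only [List.mem_cons]
        constructor
        · rintro ⟨hx, hne⟩; exact ⟨Or.inr hx, hne⟩
        · rintro ⟨hx | hx, hne⟩
          · exact absurd hx hne
          · exact ⟨hx, hne⟩
      · have e : invitesB_adj prev (y :: t) = y :: invitesB_adj y t := by
          simp [invitesB_adj, hy]
        have hlt : prev < y := lt_of_le_of_ne hpy (Ne.symm hy)
        obtain ⟨h1, h2, h3⟩ := ih y hpt hyt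
        rw [e]
        refine ⟨List.pairwise_cons.mpr ⟨h3, h1⟩, ?_, ?_⟩
        · intro x
          simp only [List.mem_cons, h2]
          constructor
          · rintro (rfl | ⟨hx, hne⟩)
            · exact ⟨Or.inl rfl, hy⟩
            · have hpx : prev < x := lt_of_lt_of_le hlt (hyt x hx)
              exact ⟨Or.inr hx, fun hc => absurd hpx (by rw [hc]; exact lt_irrefl _)⟩
          · rintro ⟨rfl | hx, hne⟩
            · exact Or.inl rfl
            · by_cases hxy : x = y
              · exact Or.inl hxy
              · exact Or.inr ⟨hx, hxy⟩
        · intro x hx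
          rcases List.mem_cons.mp hx with rfl | hx'
          · exact hlt
          · exact lt_trans hlt (h3 x hx')

-- the central fact: sorted(set(fs)) equals the adjacent-dedup of sorted(fs).
theorem sorted_ofList_eq_adj (fs : List String) :
    PySem.List.sorted (PySem.Set.ofList fs) (fun x => x) false =
    (match PySem.List.sorted fs (fun x => x) false with
     | [] => ([] : List String)
     | y :: t => y :: invitesB_adj y t) := by
  cases h : PySem.List.sorted fs (fun x => x) false with
  | nil =>
      have : fs = [] := (PySem.List.sorted_eq_nil_iff _ _ _).mp h
      subst this; rfl
  | cons y t =>
      have hpw : (y :: t).Pairwise (fun a b => a ≤ b) := by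
        have := PySem.List.sorted_pairwise (xs := fs) (key := fun x => x)
        rw [h] at this; simpa using this
      have hyt : ∀ z ∈ t, y ≤ z := fun z hz => (List.pairwise_cons.mp hpw).1 z hz
      have hpt : t.Pairwise (· ≤ ·) := (List.pairwise_cons.mp hpw).2
      obtain ⟨h1, h2, h3⟩ := invitesB_adj_spec t y hpt hyt
      have hLpw : (y :: invitesB_adj y t).Pairwise (· < ·) := List.pairwise_cons.mpr ⟨h3, h1⟩
      apply PySem.List.sorted_eq_of_perm_of_pairwise_lt
      · -- perm with ofList fs
        have hnd1 : (y :: invitesB_adj y t).Nodup := hLpw.imp (fun h => ne_of_lt h)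
        have hnd2 : (PySem.Set.ofList fs).Nodup := PySem.Set.nodup_ofList fs
        rw [List.perm_ext_iff_of_nodup hnd1 hnd2]
        intro a
        have hmemfs : a ∈ fs ↔ a ∈ y :: t := by
          rw [← h]; exact (PySem.List.mem_sorted _ _ _ _).symm
        rw [PySem.Set.mem_ofList, hmemfs]
        simp only [List.mem_cons, h2]
        constructor
        · rintro (rfl | ⟨hx, _⟩)
          · exact Or.inl rfl
          · exact Or.inr hx
        · rintro (rfl | hx)
          · exact Or.inl rfl
          · by_cases hay : a = y
            · exact Or.inl hay
            · exact Or.inr ⟨hx, hay⟩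
      · simpa using hLpw

-- ===== VERDICT (by name: the statement is the Claim_ definition above) =====
theorem invites_spec : Claim_equal_invites := by
  intro s _dom hpre
  unfold Spec_invites invites invites_alt
  rw [invitesA_loop_eq (pySplit s ";") [] PySem.Dict.empty
      (by intro x; simp [PySem.Dict.contains_empty])]
  cases hc : invitesB_collect (pySplit s ";") with
  | none => rfl
  | some fs =>
      simp only [Option.map_some]
      have hupd : PySem.Set.update [] fs = PySem.Set.ofList fs := PySem.Set.update_empty fs
      rw [hupd, sorted_ofList_eq_adj fs]
      cases PySem.List.sorted fs (fun x => x) false with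
      | nil => rfl
      | cons y t => rfl
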